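-- pv_equiv track=rewrite | github.com/wavymejti/HDB3-AMI-interpreter | hdb3.py | binary_to_ami
-- ===== SOURCE A (Python) =====
-- def binary_to_ami(binary):
--     """Funkcja zamienia ciąg binarny na kodowanie AMI."""
--     ami = []
--     last_pulse = 0  # 0 oznacza brak impulsu, 1 - dodatni, -1 - ujemny
--
--     for bit in binary:
--         if bit == '1':
--             # Generujemy impuls przeciwny do ostatniego
--             last_pulse = -last_pulse if last_pulse != 0 else 1
--             ami.append(last_pulse)
--         else:
--             # 0 oznacza brak sygnału
--             ami.append(0)
--
--     return ami
-- ===== SOURCE B (Python) =====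
-- def binary_to_ami(binary):
--     """Funkcja zamienia ciag binarny na kodowanie AMI (stateless per-position form)."""
--     return [(1 if binary[:i].count('1') % 2 == 0 else -1) if b == '1' else 0
--             for i, b in enumerate(binary)]
-- ===== Notes on version B (the rewrite author's own statement) =====
-- stated objective: alternative
-- what changed: Replaces the running last_pulse state machine by a stateless comprehension: each position's pulse is computed directly from the parity of the count of '1's in the prefix before it.
import Mathlib
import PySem

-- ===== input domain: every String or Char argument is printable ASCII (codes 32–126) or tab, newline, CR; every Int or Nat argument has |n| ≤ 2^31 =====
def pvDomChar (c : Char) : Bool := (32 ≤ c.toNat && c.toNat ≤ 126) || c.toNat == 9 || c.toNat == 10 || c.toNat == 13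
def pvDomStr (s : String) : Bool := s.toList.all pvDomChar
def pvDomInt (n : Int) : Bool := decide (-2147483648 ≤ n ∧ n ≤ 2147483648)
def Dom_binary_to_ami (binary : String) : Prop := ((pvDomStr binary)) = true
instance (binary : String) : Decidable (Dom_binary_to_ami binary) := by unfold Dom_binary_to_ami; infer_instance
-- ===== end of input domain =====

-- B replaces A's running last_pulse state machine by a stateless per-position formula
-- (pulse polarity = parity of the '1'-count in the prefix); alternative decomposition, not faster.

-- ===== PORT A =====
-- A: fold over the characters carrying (ami, last_pulse).
def binary_to_ami (binary : String) : List Int :=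
  (binary.toList.foldl
    (fun (s : List Int × Int) (bit : Char) =>
      if bit = '1' then
        let last_pulse : Int := if s.2 ≠ 0 then -s.2 else 1
        (s.1 ++ [last_pulse], last_pulse)
      else
        (s.1 ++ [0], s.2))
    ([], 0)).1

-- ===== PORT B =====
-- B: comprehension over enumerate(binary); binary[:i].count('1') ported as
-- List.count '1' on the slice (exact: counting the 1-character substring '1').
def binary_to_ami_alt (binary : String) : List Int :=
  (PySem.List.enumerate binary.toList 0).map
    (fun p =>
      if p.2 = '1' then
        if (PySem.List.slice binary.toList none (some p.1)).count '1' % 2 = 0 then (1 : Int) else -1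
      else 0)

-- ===== PRECONDITION & SPEC =====
def Spec_binary_to_ami (binary : String) (out : List Int) : Prop := out = binary_to_ami_alt binary
instance (binary : String) (out : List Int) : Decidable (Spec_binary_to_ami binary out) := by unfold Spec_binary_to_ami; infer_instance

-- ===== CLAIM (what is proved, stated in full; the proofs are below) =====
def Claim_equal_binary_to_ami : Prop := ∀ (binary : String), Dom_binary_to_ami binary → Spec_binary_to_ami binary (binary_to_ami binary)

-- ===== LEMMAS AND PROOFS =====

-- Common characterisation: AMI of the suffix, given k = number of '1's already seen.
def amiAux : Nat → List Char → List Int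
  | _, [] => []
  | k, c :: rest =>
    if c = '1' then (if k % 2 = 0 then (1 : Int) else -1) :: amiAux (k + 1) rest
    else 0 :: amiAux k rest

-- last_pulse after k ones.
def pulseOf (k : Nat) : Int := if k = 0 then 0 else if k % 2 = 1 then 1 else -1

theorem pulse_step (k : Nat) :
    (if pulseOf k ≠ 0 then -pulseOf k else 1) = pulseOf (k + 1) ∧
    pulseOf (k + 1) = (if k % 2 = 0 then (1 : Int) else -1) := by
  unfold pulseOf
  rcases k with _ | k
  · simp
  · have h := Nat.mod_two_eq_zero_or_one (k + 1)
    rcases h with h | h <;> simp [h, Nat.succ_mod_two_eq_one_iff]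

theorem foldlA (suf : List Char) : ∀ (acc : List Int) (k : Nat),
    (suf.foldl
      (fun (s : List Int × Int) (bit : Char) =>
        if bit = '1' then
          let last_pulse : Int := if s.2 ≠ 0 then -s.2 else 1
          (s.1 ++ [last_pulse], last_pulse)
        else (s.1 ++ [0], s.2))
      (acc, pulseOf k)).1 = acc ++ amiAux k suf := by
  induction suf with
  | nil => intro acc k; simp [amiAux]
  | cons c rest ih =>
    intro acc k
    by_cases hc : c = '1'
    · have hs := pulse_step k
      simp only [List.foldl_cons, hc, if_true]
      rw [hs.1, ih (acc ++ [pulseOf (k + 1)]) (k + 1)]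
      simp [amiAux, ← hs.2]
    · simp only [List.foldl_cons, if_neg hc]
      rw [ih (acc ++ [0]) k]
      simp [amiAux, hc]

theorem A_eq_aux (binary : String) : binary_to_ami binary = amiAux 0 binary.toList := by
  have h := foldlA binary.toList [] 0
  simpa [binary_to_ami, pulseOf] using h

theorem B_aux (suf : List Char) : ∀ (pre : List Char),
    (PySem.List.enumerate suf pre.length).map
      (fun p =>
        if p.2 = '1' then
          if (PySem.List.slice (pre ++ suf) none (some p.1)).count '1' % 2 = 0 then (1 : Int) else -1
        else 0) = amiAux (pre.count '1') suf := by
  induction suf with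
  | nil => intro pre; simp [PySem.List.enumerate_nil, amiAux]
  | cons c rest ih =>
    intro pre
    rw [PySem.List.enumerate_cons]
    have hslice : PySem.List.slice (pre ++ c :: rest) none (some ((pre.length : Int))) = pre := by
      rw [PySem.List.slice_to_natCast]
      simp
    have hlen : (pre.length : Int) + 1 = ((pre ++ [c]).length : Int) := by simp
    have happ : pre ++ c :: rest = (pre ++ [c]) ++ rest := by simp
    rw [List.map_cons]
    by_cases hc : c = '1'
    · have hcount : (pre ++ [c]).count '1' = pre.count '1' + 1 := by
        simp [List.count_append, hc]
      have := ih (pre ++ [c])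
      rw [happ, hlen]
      push_cast at this ⊢
      rw [this]
      simp only [hslice] at *
      -- head element
      simp [amiAux, hc]
    · have hcount : (pre ++ [c]).count '1' = pre.count '1' := by
        simp [List.count_append, hc]
      have := ih (pre ++ [c])
      rw [happ, hlen, this]
      simp [amiAux, hc, hcount]

theorem B_eq_aux (binary : String) : binary_to_ami_alt binary = amiAux 0 binary.toList := by
  have h := B_aux binary.toList []
  simpa [binary_to_ami_alt] using h

-- ===== VERDICT (by name: the statement is the Claim_ definition above) =====
theorem binary_to_ami_spec : Claim_equal_binary_to_ami := by
  intro binary _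
  unfold Spec_binary_to_ami
  rw [A_eq_aux, B_eq_aux]
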